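-- pv_equiv track=rewrite | github.com/nguyenchiemminhvu/DSA | Problems/Leetcode/EqualScoreSubstrings/solve.py | scoreBalance
-- ===== SOURCE A (Python) =====
-- def scoreBalance(s: str) -> bool:
--     prefix = [ord(c) - ord('a') + 1 for c in s]
--     total = sum(prefix)
--     left = 0
--     for i in range(0, len(prefix)):
--         left += prefix[i]
--         right = total - left
--         if left == right:
--             return True
--     return False
-- ===== SOURCE B (Python) =====
-- def scoreBalance(s: str) -> bool:
--     # Divide and conquer: for each half compute (sum, set of nonempty-prefix sums),
--     # merge by offsetting the right half's prefix sums by the left half's sum.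
--     def go(lo, hi):
--         if hi - lo == 1:
--             v = ord(s[lo]) - 96
--             return (v, {v})
--         mid = (lo + hi) // 2
--         sl, pl = go(lo, mid)
--         sr, pr = go(mid, hi)
--         return (sl + sr, pl | {sl + p for p in pr})
--     if not s:
--         return False
--     total, prefixes = go(0, len(s))
--     return any(2 * p == total for p in prefixes)
-- ===== Notes on version B (the rewrite author's own statement) =====
-- stated objective: alternative
-- what changed: A does a linear left-to-right scan comparing the running prefix sum with total minus it; B is a divide-and-conquer that recursively computes (sum, set of nonempty-prefix sums) for each half, merges the right half's prefix sums offset by the left half's sum, and finally asks whether any prefix sum doubles to the total.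
import Mathlib
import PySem

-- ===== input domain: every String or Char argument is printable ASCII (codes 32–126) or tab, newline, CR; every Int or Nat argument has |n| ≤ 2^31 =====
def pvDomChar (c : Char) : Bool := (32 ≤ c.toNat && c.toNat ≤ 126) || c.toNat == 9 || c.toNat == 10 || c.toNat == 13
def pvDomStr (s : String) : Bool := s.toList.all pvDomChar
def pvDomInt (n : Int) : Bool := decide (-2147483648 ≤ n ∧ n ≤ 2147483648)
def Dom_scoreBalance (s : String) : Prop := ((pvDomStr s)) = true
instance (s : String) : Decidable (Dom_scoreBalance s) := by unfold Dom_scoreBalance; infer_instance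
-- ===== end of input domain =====

-- B replaces A's linear prefix-scan by a divide-and-conquer that computes, for each half,
-- (sum, set of nonempty-prefix sums) and merges them; objective: alternative decomposition, same result.


-- ===== PORT A =====
-- ord c - ord 'a' + 1
def pvVal (c : Char) : Int := (c.toNat : Int) - 97 + 1

-- A's for-loop: accumulates left, early-returns when left == total - left
def pvLoopA : List Int → Int → Int → Bool
  | [], _, _ => false
  | v :: vs, left, total =>
    let l := left + v
    if l == total - l then true else pvLoopA vs l total

def scoreBalance (s : String) : Bool :=
  let pref := s.toList.map pvVal
  let total := pref.sum
  pvLoopA pref 0 total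

-- ===== PORT B =====
-- B's recursive helper go(lo, hi) on s[lo:hi], here on the sublist itself: returns
-- (sum of values, set of sums of nonempty prefixes); split size mid-lo = (hi-lo)//2 = length/2.
def pvGo : List Char → Int × PySem.Set Int
  | [] => (0, PySem.Set.empty)
  | [c] => (pvVal c, PySem.Set.ofList [pvVal c])
  | c1 :: c2 :: rest =>
    let cs := c1 :: c2 :: rest
    let m := cs.length / 2
    let l := pvGo (cs.take m)
    let r := pvGo (cs.drop m)
    (l.1 + r.1, PySem.Set.union l.2 (PySem.Set.ofList (r.2.map (fun p => l.1 + p))))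
termination_by cs => cs.length
decreasing_by
  · simp [List.length_take]; omega
  · simp [List.length_drop]; omega

def scoreBalance_alt (s : String) : Bool :=
  match s.toList with
  | [] => false
  | c :: cs =>
    let res := pvGo (c :: cs)
    res.2.any (fun p => 2 * p == res.1)

-- ===== PRECONDITION & SPEC =====
def Spec_scoreBalance (s : String) (out : Bool) : Prop := out = scoreBalance_alt s
instance (s : String) (out : Bool) : Decidable (Spec_scoreBalance s out) := by unfold Spec_scoreBalance; infer_instance

-- ===== CLAIM (what is proved, stated in full; the proofs are below) =====
def Claim_equal_scoreBalance : Prop := ∀ (s : String), Dom_scoreBalance s → Spec_scoreBalance s (scoreBalance s)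

-- ===== LEMMAS AND PROOFS =====

-- the list of nonempty-prefix sums of vs starting from accumulator acc
def pvAccs : List Int → Int → List Int
  | [], _ => []
  | v :: vs, acc => (acc + v) :: pvAccs vs (acc + v)

-- A's scan returns true iff some prefix sum a satisfies 2a = total
theorem pvLoopA_eq_any (vs : List Int) : ∀ (left total : Int),
    pvLoopA vs left total = (pvAccs vs left).any (fun a => 2 * a == total) := by
  induction vs with
  | nil => intro left total; rfl
  | cons v vs ih =>
    intro left total
    simp only [pvLoopA, pvAccs, List.any_cons, ih]
    by_cases h : left + v = total - (left + v)
    · have h1 : ((left + v) == total - (left + v)) = true := beq_iff_eq.mpr h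
      have h2 : ((2 * (left + v)) == total) = true := beq_iff_eq.mpr (by omega)
      rw [h1, h2]; simp
    · have h1 : ((left + v) == total - (left + v)) = false := beq_eq_false_iff_ne.mpr h
      have h2 : ((2 * (left + v)) == total) = false := beq_eq_false_iff_ne.mpr (by omega)
      rw [h1, h2]; simp

theorem pvAccs_append (a : List Int) : ∀ (b : List Int) (acc : Int),
    pvAccs (a ++ b) acc = pvAccs a acc ++ pvAccs b (acc + a.sum) := by
  induction a with
  | nil => intro b acc; simp [pvAccs]
  | cons v a ih =>
    intro b acc
    simp only [List.cons_append, pvAccs, ih, List.sum_cons]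
    congr 2
    ring_nf

theorem pvAccs_shift (vs : List Int) : ∀ (acc : Int),
    pvAccs vs acc = (pvAccs vs 0).map (fun p => acc + p) := by
  induction vs with
  | nil => intro acc; rfl
  | cons v vs ih =>
    intro acc
    simp only [pvAccs]
    rw [ih (acc + v), ih (0 + v)]
    simp only [List.map_cons, List.map_map, List.cons.injEq]
    constructor
    · omega
    · apply List.map_congr_left
      intro p _
      simp only [Function.comp_apply]
      omega

-- the invariant of B's divide and conquer
theorem pvGo_spec (cs : List Char) (hne : cs ≠ []) :
    (pvGo cs).1 = (cs.map pvVal).sum ∧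
    ∀ x, x ∈ (pvGo cs).2 ↔ x ∈ pvAccs (cs.map pvVal) 0 := by
  induction cs using pvGo.induct with
  | case1 => exact absurd rfl hne
  | case2 c =>
    constructor
    · simp [pvGo]
    · intro x; simp [pvGo, pvAccs, PySem.Set.mem_ofList]
  | case3 c1 c2 rest cs m ihl ihr =>
    have hlen : cs.length = rest.length + 2 := by simp [cs]
    have hm : 1 ≤ m ∧ m < cs.length := by
      constructor <;> (simp only [m, hlen]; omega)
    have htne : cs.take m ≠ [] := by
      intro h; have := congrArg List.length h; simp at this; omega
    have hdne : cs.drop m ≠ [] := by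
      intro h; have := congrArg List.length h; simp at this; omega
    obtain ⟨ihl1, ihl2⟩ := ihl htne
    obtain ⟨ihr1, ihr2⟩ := ihr hdne
    have hsplit : cs = cs.take m ++ cs.drop m := (List.take_append_drop m cs).symm
    have hmap : cs.map pvVal = (cs.take m).map pvVal ++ (cs.drop m).map pvVal := by
      conv_lhs => rw [hsplit]
      simp
    have hgo : pvGo cs =
        ((pvGo (cs.take m)).1 + (pvGo (cs.drop m)).1,
          PySem.Set.union (pvGo (cs.take m)).2
            (PySem.Set.ofList ((pvGo (cs.drop m)).2.map (fun p => (pvGo (cs.take m)).1 + p)))) := by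
      conv_lhs => rw [show cs = c1 :: c2 :: rest from rfl]
      rw [pvGo]
    constructor
    · rw [hgo, hmap]
      simp only [List.sum_append]
      rw [← ihl1, ← ihr1]
    · intro x
      rw [hgo, hmap, pvAccs_append]
      simp only [List.mem_append, PySem.Set.mem_union, PySem.Set.mem_ofList, List.mem_map]
      rw [ihl2, zero_add, pvAccs_shift _ ((cs.take m).map pvVal).sum, List.mem_map, ← ihl1]
      constructor
      · rintro (h | ⟨p, hp, rfl⟩)
        · exact Or.inl h
        · exact Or.inr ⟨p, (ihr2 p).mp hp, rfl⟩
      · rintro (h | ⟨p, hp, rfl⟩)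
        · exact Or.inl h
        · exact Or.inr ⟨p, (ihr2 p).mpr hp, rfl⟩

-- two lists with the same members have the same 'any'
theorem any_congr_mem (l1 l2 : List Int) (h : ∀ x, x ∈ l1 ↔ x ∈ l2) (f : Int → Bool) :
    l1.any f = l2.any f := by
  rw [Bool.eq_iff_iff]
  simp only [List.any_eq_true]
  constructor
  · rintro ⟨x, hx, hf⟩; exact ⟨x, (h x).mp hx, hf⟩
  · rintro ⟨x, hx, hf⟩; exact ⟨x, (h x).mpr hx, hf⟩

-- ===== VERDICT (by name: the statement is the Claim_ definition above) =====
theorem scoreBalance_spec : Claim_equal_scoreBalance := by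
  intro s _
  unfold Spec_scoreBalance
  cases hcs : s.toList with
  | nil =>
    have hA : scoreBalance s = false := by
      unfold scoreBalance; rw [hcs]; rfl
    have hB : scoreBalance_alt s = false := by
      unfold scoreBalance_alt; rw [hcs]
    rw [hA, hB]
  | cons c cs =>
    obtain ⟨h1, h2⟩ := pvGo_spec (c :: cs) (by simp)
    have hA : scoreBalance s =
        (pvAccs ((c :: cs).map pvVal) 0).any
          (fun a => 2 * a == ((c :: cs).map pvVal).sum) := by
      unfold scoreBalance; rw [hcs, pvLoopA_eq_any]
    have hB : scoreBalance_alt s =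
        (pvGo (c :: cs)).2.any (fun p => 2 * p == (pvGo (c :: cs)).1) := by
      unfold scoreBalance_alt; rw [hcs]
    rw [hA, hB, h1]
    exact (any_congr_mem _ _ h2 _).symm
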